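-- pv_equiv track=rewrite | github.com/daniel-reich/ubiquitous-fiesta | wbhjXmdbPSxCSE5hW_20.py | sigilize
-- ===== SOURCE A (Python) =====
-- def sigilize(desire):
--   vowels = "AEIOU"
--   desire = desire.upper().replace(' ','')
--   sigil=''
--   for i in range(len(desire)):
--     if desire[i] not in vowels:
--       if desire[i] not in desire[i+1:]:
--         sigil+=desire[i]
--   return sigil
-- ===== SOURCE B (Python) =====
-- def sigilize(desire):
--     s = desire.upper().replace(' ', '')
--     vowels = "AEIOU"
--     seen = set()
--     out = []
--     for c in reversed(s):
--         if c not in seen: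
--             seen.add(c)
--             if c not in vowels:
--                 out.append(c)
--     return ''.join(reversed(out))
-- ===== Notes on version B (the rewrite author's own statement) =====
-- stated objective: faster
-- what changed: Replaces the quadratic per-character suffix membership test with a single backward pass over the cleaned string that maintains a seen-set and appends unseen consonants, reversing the buffer at the end.
import Mathlib
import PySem

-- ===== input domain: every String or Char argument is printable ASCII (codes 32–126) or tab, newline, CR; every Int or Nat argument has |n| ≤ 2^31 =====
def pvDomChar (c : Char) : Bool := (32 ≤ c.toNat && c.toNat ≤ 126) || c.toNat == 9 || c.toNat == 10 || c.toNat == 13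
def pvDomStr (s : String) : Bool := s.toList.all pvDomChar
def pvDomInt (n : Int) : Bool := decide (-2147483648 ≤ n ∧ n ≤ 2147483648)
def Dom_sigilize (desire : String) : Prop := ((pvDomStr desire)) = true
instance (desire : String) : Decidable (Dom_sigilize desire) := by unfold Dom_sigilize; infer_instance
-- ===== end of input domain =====

-- B replaces A's quadratic "char not in the remaining suffix" test by one backward pass with a
-- seen-set and a final reverse (objective: faster).

-- ===== PORT A =====
-- loop body of A: `if desire[i] not in vowels: if desire[i] not in desire[i+1:]: sigil += desire[i]`
def sigilizeStep (d : List Char) (sigil : List Char) (i : Nat) : List Char :=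
  match PySem.List.pyGet? d (i : Int) with
  | some c =>
      if c ∉ ("AEIOU".toList) then
        if c ∉ PySem.List.slice d (some ((i : Int) + 1)) none then sigil ++ [c] else sigil
      else sigil
  | none => sigil

def sigilize (desire : String) : String :=
  let d : List Char := (PySem.Str.replace (PySem.Str.upper desire) " " "").toList
  String.ofList ((List.range d.length).foldl (sigilizeStep d) [])

-- ===== PORT B =====
-- loop body of B: `if c not in seen: seen.add(c); if c not in vowels: out.append(c)`
def sigilizeAltStep (st : PySem.Set Char × List Char) (c : Char) : PySem.Set Char × List Char :=
  if PySem.Set.contains st.1 c then st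
  else (PySem.Set.add st.1 c, if c ∉ ("AEIOU".toList) then st.2 ++ [c] else st.2)

def sigilize_alt (desire : String) : String :=
  let d : List Char := (PySem.Str.replace (PySem.Str.upper desire) " " "").toList
  let st := d.reverse.foldl sigilizeAltStep (PySem.Set.empty, [])
  String.ofList st.2.reverse

-- ===== PRECONDITION & SPEC =====
def Spec_sigilize (desire : String) (out : String) : Prop := out = sigilize_alt desire
instance (desire : String) (out : String) : Decidable (Spec_sigilize desire out) := by unfold Spec_sigilize; infer_instance

-- ===== CLAIM (what is proved, stated in full; the proofs are below) =====
def Claim_equal_sigilize : Prop := ∀ (desire : String), Dom_sigilize desire → Spec_sigilize desire (sigilize desire)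

-- ===== LEMMAS AND PROOFS =====

-- the common result both loops compute: last occurrences of non-vowels, in order
def pvGold : List Char → List Char
  | [] => []
  | c :: rest =>
      if c ∉ ("AEIOU".toList) ∧ c ∉ rest then c :: pvGold rest else pvGold rest

lemma pvStepA_shift (c : Char) (rest : List Char) (a : List Char) (i : Nat) :
    sigilizeStep (c :: rest) a (i + 1) = sigilizeStep rest a i := by
  unfold sigilizeStep
  have h1 : PySem.List.pyGet? (c :: rest) ((i + 1 : Nat) : Int) = rest[i]? := by
    rw [PySem.List.pyGet?_natCast]; simp
  have h2 : PySem.List.pyGet? rest ((i : Nat) : Int) = rest[i]? := by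
    rw [PySem.List.pyGet?_natCast]
  have h3 : PySem.List.slice (c :: rest) (some (((i + 1 : Nat) : Int) + 1)) none
      = rest.drop (i + 1) := by
    have he : (((i + 1 : Nat) : Int) + 1) = ((i + 2 : Nat) : Int) := by push_cast; ring
    rw [he, PySem.List.slice_from_natCast]
    simp
  have h4 : PySem.List.slice rest (some (((i : Nat) : Int) + 1)) none = rest.drop (i + 1) := by
    have he : (((i : Nat) : Int) + 1) = ((i + 1 : Nat) : Int) := by push_cast; ring
    rw [he, PySem.List.slice_from_natCast]
  rw [h1, h2, h3, h4]

lemma pvStepA_zero (c : Char) (rest : List Char) (acc : List Char) :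
    sigilizeStep (c :: rest) acc 0
      = if c ∉ ("AEIOU".toList) ∧ c ∉ rest then acc ++ [c] else acc := by
  unfold sigilizeStep
  have hg : PySem.List.pyGet? (c :: rest) ((0 : Nat) : Int) = some c := by
    rw [PySem.List.pyGet?_natCast]; simp
  have hs : PySem.List.slice (c :: rest) (some (((0 : Nat) : Int) + 1)) none = rest := by
    have he : (((0 : Nat) : Int) + 1) = ((1 : Nat) : Int) := by norm_num
    rw [he, PySem.List.slice_from_natCast]; simp
  rw [hg, hs]
  by_cases hv : c ∈ ("AEIOU".toList) <;> by_cases hr : c ∈ rest <;> simp [hr]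

lemma pvA_foldl (d : List Char) : ∀ (acc : List Char),
    (List.range d.length).foldl (sigilizeStep d) acc = acc ++ pvGold d := by
  induction d with
  | nil => intro acc; simp [pvGold]
  | cons c rest ih =>
      intro acc
      have hfun : (fun (a : List Char) (i : Nat) => sigilizeStep (c :: rest) a (i + 1))
          = sigilizeStep rest := by
        funext a i; exact pvStepA_shift c rest a i
      rw [List.length_cons, List.range_succ_eq_map, List.foldl_cons, List.foldl_map]
      simp only [Nat.succ_eq_add_one]
      rw [hfun, ih, pvStepA_zero]
      have hg : pvGold (c :: rest)
          = if c ∉ ("AEIOU".toList) ∧ c ∉ rest then c :: pvGold rest else pvGold rest := rfl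
      rw [hg]
      split_ifs with h <;> simp

-- B's fold written front-to-back, for induction
def pvBfold : List Char → PySem.Set Char × List Char
  | [] => (PySem.Set.empty, [])
  | c :: rest => sigilizeAltStep (pvBfold rest) c

lemma pvBfold_eq_foldl (d : List Char) :
    d.reverse.foldl sigilizeAltStep (PySem.Set.empty, []) = pvBfold d := by
  rw [List.foldl_reverse]
  induction d with
  | nil => rfl
  | cons c rest ih => simp only [List.foldr_cons, ih, pvBfold]

lemma pvB_fold_spec (d : List Char) :
    (∀ x, x ∈ (pvBfold d).1 ↔ x ∈ d) ∧ (pvBfold d).2.reverse = pvGold d := by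
  induction d with
  | nil => simp [pvBfold, PySem.Set.empty, pvGold]
  | cons c rest ih =>
      obtain ⟨hmem, hout⟩ := ih
      by_cases hc : c ∈ rest
      · have hcont : PySem.Set.contains (pvBfold rest).1 c = true := by
          rw [PySem.Set.contains_iff]; exact (hmem c).mpr hc
        have hstep : pvBfold (c :: rest) = pvBfold rest := by
          show sigilizeAltStep (pvBfold rest) c = pvBfold rest
          unfold sigilizeAltStep; rw [hcont]; simp
        rw [hstep]
        refine ⟨fun x => ?_, ?_⟩
        · rw [hmem x, List.mem_cons]
          constructor
          · exact Or.inr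
          · rintro (hx | hx)
            · subst hx; exact hc
            · exact hx
        · rw [hout]
          have hg : pvGold (c :: rest)
              = if c ∉ ("AEIOU".toList) ∧ c ∉ rest then c :: pvGold rest else pvGold rest := rfl
          rw [hg, if_neg (by tauto : ¬ (c ∉ ("AEIOU".toList) ∧ c ∉ rest))]
      · have hcont : PySem.Set.contains (pvBfold rest).1 c = false := by
          rw [Bool.eq_false_iff, Ne, PySem.Set.contains_iff]
          intro h; exact hc ((hmem c).mp h)
        have hstep : pvBfold (c :: rest)
            = (PySem.Set.add (pvBfold rest).1 c,
               if c ∉ ("AEIOU".toList) then (pvBfold rest).2 ++ [c] else (pvBfold rest).2) := by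
          show sigilizeAltStep (pvBfold rest) c = _
          unfold sigilizeAltStep; rw [hcont]; simp
        rw [hstep]
        refine ⟨fun x => ?_, ?_⟩
        · simp only [PySem.Set.mem_add, hmem x, List.mem_cons]
          tauto
        · have hg : pvGold (c :: rest)
              = if c ∉ ("AEIOU".toList) ∧ c ∉ rest then c :: pvGold rest else pvGold rest := rfl
          by_cases hv : c ∈ ("AEIOU".toList)
          · rw [if_neg (fun hn => hn hv), hout, hg,
              if_neg (by tauto : ¬ (c ∉ ("AEIOU".toList) ∧ c ∉ rest))]
          · rw [if_pos hv]
            simp only [List.reverse_append, List.reverse_cons, List.reverse_nil,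
              List.nil_append, List.singleton_append]
            rw [hout, hg, if_pos ⟨hv, hc⟩]

-- ===== VERDICT (by name: the statement is the Claim_ definition above) =====
theorem sigilize_spec : Claim_equal_sigilize := by
  intro desire _
  unfold Spec_sigilize sigilize sigilize_alt
  dsimp only []
  rw [pvA_foldl, pvBfold_eq_foldl, (pvB_fold_spec _).2, List.nil_append]
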